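-- pv_equiv track=rewrite | github.com/ASSERT-KTH/C4B_APR | data_directory/2785_problem_id/105055_author_id/Accepted.py | calc_substr
-- ===== SOURCE A (Python) =====
-- def calc_substr(s, sub):
--     """
--     >>> calc_substr('KV', 'VK')
--     0
--     >>> calc_substr('VK', 'VK')
--     1
--     >>> calc_substr('VV', 'VK')
--     1
--     >>> calc_substr('V', 'VK')
--     0
--     >>> calc_substr('VKKKKKKKKKVVVVVVVVVK', 'VK')
--     3
--     >>> calc_substr('KVKV', 'VK')
--     1
--     >>> calc_substr('VKKKK', 'VK')
--     2
--     """
--     max_cnt = s.count(sub)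
--     for i in range(len(s)):
--         l = list(s)
--         for k in 'VK':
--             l[i] = k
--             tmp_cnt = ''.join(l).count(sub)
--             max_cnt = max(max_cnt, tmp_cnt)
--     return max_cnt
-- ===== SOURCE B (Python) =====
-- def calc_substr(s, sub):
--     n, m = len(s), len(sub)
--     if m == 0:
--         return n + 1
--
--     # For each window start j: mismatch count against sub capped at 2, and the
--     # index in s of the last recorded mismatch.
--     def mism_row(j):
--         cnt, pos = 0, -1
--         for t in range(m):
--             if s[j + t] != sub[t]:
--                 cnt += 1
--                 pos = j + t
--                 if cnt > 1:
--                     break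
--         return (cnt, pos)
--
--     mism = [mism_row(j) for j in range(n + 1 - m)]
--
--     def match0(j):
--         return mism[j][0] == 0
--
--     # gb[j] = greedy non-overlapping match count of the unmodified s from position j
--     gb = [0] * (n + 2)
--     for j in reversed(range(n + 1 - m)):
--         gb[j] = 1 + gb[j + m] if match0(j) else gb[j + 1]
--
--     # Baseline greedy trajectory from 0: visited positions with the count so far,
--     # including the final state.
--     vis = []
--     j = c = 0
--     while j + m <= n:
--         vis.append((j, c))
--         if match0(j):
--             c += 1
--             j += m
--         else:
--             j += 1
--     vis.append((j, c))
--
--     # res[p] = the first trajectory entry (position, count) with position >= p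
--     res = []
--     for (vj, vc) in vis:
--         res += [(vj, vc)] * (vj + 1 - len(res))
--     res += [vis[-1]] * (n + 1 - len(res))
--
--     # For every single-char change (i -> k): splice the baseline prefix up to the
--     # first trajectory position that can see i, run a short greedy over the at
--     # most m windows containing i, and finish with the baseline suffix count gb.
--     best = gb[0]
--     for i in range(n):
--         lo = max(i + 1 - m, 0)
--         e, c0 = res[lo]
--         for k in 'VK':
--             j, c = e, c0
--             while j <= i and j + m <= n:
--                 cnt, pos = mism[j]
--                 if k == sub[i - j] and (cnt == 0 or (cnt == 1 and pos == i)):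
--                     c += 1
--                     j += m
--                 else:
--                     j += 1
--             best = max(best, c + gb[j])
--     return best
-- ===== Notes on version B (the rewrite author's own statement) =====
-- stated objective: faster
-- what changed: A rebuilds the whole string and re-counts sub for every position and replacement character (O(n^2*m)); B precomputes a per-window mismatch table, a suffix table of greedy non-overlapping counts and the baseline greedy trajectory, then evaluates each single-character edit by splicing the unchanged baseline prefix, a short greedy pass over only the <= m windows overlapping the edited position, and the baseline suffix count (O(n*m)).
import Mathlib
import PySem

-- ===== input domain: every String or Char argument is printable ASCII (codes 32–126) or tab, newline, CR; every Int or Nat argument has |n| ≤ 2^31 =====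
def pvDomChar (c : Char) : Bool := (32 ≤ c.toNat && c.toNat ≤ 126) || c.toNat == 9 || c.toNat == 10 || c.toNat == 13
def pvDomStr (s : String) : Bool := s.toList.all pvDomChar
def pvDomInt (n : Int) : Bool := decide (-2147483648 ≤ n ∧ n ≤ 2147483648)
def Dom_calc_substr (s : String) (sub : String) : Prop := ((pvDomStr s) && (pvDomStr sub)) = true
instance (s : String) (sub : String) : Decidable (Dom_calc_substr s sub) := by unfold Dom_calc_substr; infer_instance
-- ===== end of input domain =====

-- B replaces A's rebuild-and-count scan over all n single-character edits (each O(n·m))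
-- by one mismatch table, one suffix greedy-count table and a baseline greedy trajectory,
-- so each edit needs only the ≤ m windows that overlap the edited position: O(n·m) total.

-- ===== PORT A =====
-- ''.join(l) of the list of the characters of s is the string of those characters, so
-- ''.join(l).count(sub) is ported as PySem.Chars.count on the character list.
-- l[i] = k with 0 ≤ i < len(l) (i from range(len(s))) is ported as List.set i.toNat.
def calc_substr (s : String) (sub : String) : Int :=
  let sl := s.toList
  let subl := sub.toList
  let max_cnt : Int := (PySem.Chars.count sl subl : Int)
  (PySem.List.pyRange 0 (sl.length : Int) 1).foldl
    (fun mc i =>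
      (((['V', 'K'] : List Char).foldl
        (fun (st : List Char × Int) k =>
          let l := st.1.set i.toNat k
          let tmp : Int := (PySem.Chars.count l subl : Int)
          (l, max st.2 tmp))
        (sl, mc))).2)
    max_cnt

-- ===== PORT B =====
-- (port of Source B; loop counters Python keeps ≥ 0 are Nat, in-range s[x] is List.getD)

-- inner loop of mism_row: scan offsets t, cap the mismatch count at 2 (the break)
def pvMismInner (sl subl : List Char) (j : Nat) : List Nat → Int × Int → Int × Int
  | [], st => st
  | t :: ts, st =>
    if sl.getD (j + t) ' ' ≠ subl.getD t ' ' then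
      let cnt := st.1 + 1
      let pos : Int := ((j + t : Nat) : Int)
      if cnt > 1 then (cnt, pos) else pvMismInner sl subl j ts (cnt, pos)
    else pvMismInner sl subl j ts st

def pvMism (sl subl : List Char) : List (Int × Int) :=
  (List.range (sl.length + 1 - subl.length)).map
    (fun j => pvMismInner sl subl j (List.range subl.length) (0, -1))

def pvMatch0 (mism : List (Int × Int)) (j : Nat) : Bool := (mism.getD j (0, -1)).1 == 0

-- for j in reversed(range(n + 1 - m)): gb[j] = ...; the counter argument is j + 1
def pvGbLoop (mism : List (Int × Int)) (m : Nat) : Nat → List Int → List Int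
  | 0, gb => gb
  | jp1 + 1, gb =>
      let j := jp1
      let gb' := gb.set j (if pvMatch0 mism j then 1 + gb.getD (j + m) 0 else gb.getD (j + 1) 0)
      pvGbLoop mism m jp1 gb'

-- while j + m <= n: vis.append((j, c)); step — fuel n + 1 strictly exceeds the iteration
-- count (each iteration increases j by ≥ 1 while j ≤ n - m); then the final append
def pvVisLoop (mism : List (Int × Int)) (m n : Nat) : Nat → Nat → Nat → List (Nat × Nat) → List (Nat × Nat)
  | 0, j, c, vis => vis ++ [(j, c)]
  | fuel + 1, j, c, vis =>
      if j + m ≤ n then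
        if pvMatch0 mism j then pvVisLoop mism m n fuel (j + m) (c + 1) (vis ++ [(j, c)])
        else pvVisLoop mism m n fuel (j + 1) c (vis ++ [(j, c)])
      else vis ++ [(j, c)]

-- res += [(vj, vc)] * (vj + 1 - len(res)); Python's negative repeat count gives [],
-- exactly Nat subtraction
def pvResLoop : List (Nat × Nat) → List (Nat × Nat) → List (Nat × Nat)
  | [], res => res
  | (vj, vc) :: rest, res => pvResLoop rest (res ++ List.replicate (vj + 1 - res.length) (vj, vc))

-- while j <= i and j + m <= n: ...; fuel n + 1 strictly exceeds the iteration count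
def pvLocalLoop (subl : List Char) (mism : List (Int × Int)) (m n i : Nat) (k : Char) : Nat → Nat → Nat → Nat × Nat
  | 0, j, c => (j, c)
  | fuel + 1, j, c =>
      if j ≤ i ∧ j + m ≤ n then
        let cp := mism.getD j (0, -1)
        if k == subl.getD (i - j) ' ' && (cp.1 == 0 || (cp.1 == 1 && cp.2 == ((i : Nat) : Int))) then
          pvLocalLoop subl mism m n i k fuel (j + m) (c + 1)
        else pvLocalLoop subl mism m n i k fuel (j + 1) c
      else (j, c)

def calc_substr_alt (s : String) (sub : String) : Int :=
  let sl := s.toList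
  let subl := sub.toList
  let n := sl.length
  let m := subl.length
  if m = 0 then (n : Int) + 1
  else
    let mism := pvMism sl subl
    let gb := pvGbLoop mism m (n + 1 - m) (List.replicate (n + 2) 0)
    let vis := pvVisLoop mism m n (n + 1) 0 0 []
    let res0 := pvResLoop vis []
    let res := res0 ++ List.replicate (n + 1 - res0.length) (vis.getLastD (0, 0))
    (List.range n).foldl
      (fun best i =>
        let lo := i + 1 - m   -- max(i - m + 1, 0)
        let ec := res.getD lo (0, 0)
        (['V', 'K'] : List Char).foldl
          (fun best k =>
            let jc := pvLocalLoop subl mism m n i k (n + 1) ec.1 ec.2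
            max best ((jc.2 : Int) + gb.getD jc.1 0))
          best)
      (gb.getD 0 0)

-- ===== PRECONDITION & SPEC =====
def Spec_calc_substr (s : String) (sub : String) (out : Int) : Prop := out = calc_substr_alt s sub
instance (s : String) (sub : String) (out : Int) : Decidable (Spec_calc_substr s sub out) := by unfold Spec_calc_substr; infer_instance

-- ===== CLAIM (what is proved, stated in full; the proofs are below) =====
def Claim_equal_calc_substr : Prop := ∀ (s : String) (sub : String), Dom_calc_substr s sub → Spec_calc_substr s sub (calc_substr s sub)

-- ===== LEMMAS AND PROOFS =====

def gcnt (p : Nat → Bool) (m n : Nat) : Nat → Nat → Nat → Nat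
  | 0, _, c => c
  | fuel + 1, j, c =>
      if j + m ≤ n then
        (if p j then gcnt p m n fuel (j + m) (c + 1) else gcnt p m n fuel (j + 1) c)
      else c

lemma gcnt_acc (p : Nat → Bool) (m n : Nat) :
    ∀ fuel j c, gcnt p m n fuel j c = c + gcnt p m n fuel j 0 := by
  intro fuel
  induction fuel with
  | zero => intro j c; simp [gcnt]
  | succ f ih =>
    intro j c
    simp only [gcnt]
    split_ifs with h1 h2
    · rw [ih (j + m) (c + 1)]
      rw [ih (j + m) (0 + 1)]
      omega
    · rw [ih (j + 1) c, ih (j + 1) 0]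
    · simp

lemma gcnt_fuel_mono (p : Nat → Bool) (m n : Nat) (hm : 0 < m) :
    ∀ fuel fuel' j c, n + 1 ≤ j + fuel → fuel ≤ fuel' →
      gcnt p m n fuel j c = gcnt p m n fuel' j c := by
  intro fuel
  induction fuel with
  | zero =>
    intro fuel' j c h _
    cases fuel' with
    | zero => rfl
    | succ f' =>
      have : ¬ (j + m ≤ n) := by omega
      simp [gcnt, this]
  | succ f ih =>
    intro fuel' j c h hle
    cases fuel' with
    | zero => omega
    | succ f' =>
      simp only [gcnt]
      split_ifs with h1 h2
      · exact ih f' (j + m) (c + 1) (by omega) (by omega)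
      · exact ih f' (j + 1) c (by omega) (by omega)
      · rfl

lemma gcnt_fuel (p : Nat → Bool) (m n : Nat) (hm : 0 < m) (fuel fuel' j c : Nat)
    (h : n + 1 ≤ j + fuel) (h' : n + 1 ≤ j + fuel') :
    gcnt p m n fuel j c = gcnt p m n fuel' j c := by
  rcases le_total fuel fuel' with hle | hle
  · exact gcnt_fuel_mono p m n hm fuel fuel' j c h hle
  · exact (gcnt_fuel_mono p m n hm fuel' fuel j c h' hle).symm

lemma gcnt_congr (p q : Nat → Bool) (m n : Nat) :
    ∀ fuel j c, (∀ j', j ≤ j' → j' + m ≤ n → p j' = q j') →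
      gcnt p m n fuel j c = gcnt q m n fuel j c := by
  intro fuel
  induction fuel with
  | zero => intro j c _; rfl
  | succ f ih =>
    intro j c hagr
    show (if j + m ≤ n then (if p j then gcnt p m n f (j + m) (c + 1) else gcnt p m n f (j + 1) c) else c)
       = (if j + m ≤ n then (if q j then gcnt q m n f (j + m) (c + 1) else gcnt q m n f (j + 1) c) else c)
    by_cases h1 : j + m ≤ n
    · rw [if_pos h1, if_pos h1, show q j = p j from (hagr j le_rfl h1).symm]
      by_cases h2 : p j
      · rw [if_pos h2, if_pos h2]
        exact ih (j + m) (c + 1) (fun j' hj' h' => hagr j' (by omega) h')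
      · rw [if_neg h2, if_neg h2]
        exact ih (j + 1) c (fun j' hj' h' => hagr j' (by omega) h')
    · rw [if_neg h1, if_neg h1]

lemma gcnt_step (p : Nat → Bool) (m n : Nat) (hm : 0 < m) (j c : Nat) (hj : j + m ≤ n) :
    gcnt p m n (n + 1) j c
      = if p j then gcnt p m n (n + 1) (j + m) (c + 1) else gcnt p m n (n + 1) (j + 1) c := by
  conv_lhs => rw [show n + 1 = n + 1 from rfl]
  have : gcnt p m n (n + 1) j c
      = if j + m ≤ n then (if p j then gcnt p m n n (j + m) (c + 1) else gcnt p m n n (j + 1) c) else c := rfl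
  rw [this]
  rw [if_pos hj]
  split_ifs with h2
  · exact gcnt_fuel p m n hm n (n + 1) (j + m) (c + 1) (by omega) (by omega)
  · exact gcnt_fuel p m n hm n (n + 1) (j + 1) c (by omega) (by omega)

lemma countgo_small (subl : List Char) :
    ∀ fuel (r : List Char) c, r.length < subl.length →
      PySem.Chars.count.go subl fuel r c = c := by
  intro fuel
  induction fuel with
  | zero => intro r c _; cases r <;> rw [PySem.Chars.count.go]
  | succ f ih =>
    intro r c hr
    cases r with
    | nil => rw [PySem.Chars.count.go]; omega
    | cons hd tl =>
      have hpre : subl.isPrefixOf (hd :: tl) = false := by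
        cases hx : subl.isPrefixOf (hd :: tl) with
        | false => rfl
        | true =>
          exfalso
          have := List.IsPrefix.length_le (List.isPrefixOf_iff_prefix.mp hx)
          simp at this hr
          omega
      rw [PySem.Chars.count.go]
      simp only [hpre]
      simp only [Bool.false_eq_true, if_false]
      exact ih tl c (by simp at hr ⊢; omega)

lemma countgo_eq_gcnt (subl : List Char) (n : Nat) (hm : 0 < subl.length) :
    ∀ fuel fuel2 j c (l : List Char), l.length = n → n ≤ j + fuel → n ≤ j + fuel2 →
      PySem.Chars.count.go subl fuel2 (l.drop j) c
        = gcnt (fun j' => subl.isPrefixOf (l.drop j')) subl.length n fuel j c := by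
  intro fuel
  induction fuel with
  | zero =>
    intro fuel2 j c l hl h1 h2
    have hje : n ≤ j := by omega
    have : (l.drop j).length < subl.length := by simp [hl]; omega
    rw [countgo_small subl fuel2 _ c this]
    rfl
  | succ f ih =>
    intro fuel2 j c l hl h1 h2
    by_cases hg : j + subl.length ≤ n
    · have hdropne : (l.drop j).length = n - j := by simp [hl]
      obtain ⟨hd, tl, he⟩ : ∃ hd tl, l.drop j = hd :: tl := by
        cases hle : l.drop j with
        | nil => exfalso; rw [hle] at hdropne; simp at hdropne; omega
        | cons a b => exact ⟨a, b, rfl⟩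
      obtain ⟨f2, rfl⟩ : ∃ f2, fuel2 = f2 + 1 := by
        refine ⟨fuel2 - 1, ?_⟩; omega
      have hstep : gcnt (fun j' => subl.isPrefixOf (l.drop j')) subl.length n (f + 1) j c
          = if subl.isPrefixOf (l.drop j) then
              gcnt (fun j' => subl.isPrefixOf (l.drop j')) subl.length n f (j + subl.length) (c + 1)
            else gcnt (fun j' => subl.isPrefixOf (l.drop j')) subl.length n f (j + 1) c := by
        show (if j + subl.length ≤ n then _ else c) = _
        rw [if_pos hg]
      rw [hstep, he]
      by_cases hpre : subl.isPrefixOf (hd :: tl) = true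
      · rw [PySem.Chars.count.go]
        simp only [hpre, if_true]
        have hdd : List.drop subl.length (hd :: tl) = l.drop (j + subl.length) := by
          rw [← he, List.drop_drop]
        rw [hdd]
        exact ih f2 (j + subl.length) (c + 1) l hl (by omega) (by omega)
      · have hpre' : subl.isPrefixOf (hd :: tl) = false := by
          cases hx : subl.isPrefixOf (hd :: tl) <;> simp_all
        rw [PySem.Chars.count.go]
        simp only [hpre', Bool.false_eq_true, if_false]
        have htl : tl = l.drop (j + 1) := by
          have h4 := List.tail_drop (l := l) (i := j)
          rw [he] at h4
          simp at h4
          exact h4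
        rw [htl]
        exact ih f2 (j + 1) c l hl (by omega) (by omega)
    · have hsmall : (l.drop j).length < subl.length := by simp [hl]; omega
      rw [countgo_small subl _ _ c hsmall]
      show _ = if j + subl.length ≤ n then _ else c
      rw [if_neg hg]

lemma count_eq_gcnt (subl l : List Char) (n : Nat) (hm : 0 < subl.length) (hl : l.length = n) :
    PySem.Chars.count l subl
      = gcnt (fun j' => subl.isPrefixOf (l.drop j')) subl.length n (n + 1) 0 0 := by
  have hne : subl.isEmpty = false := by
    cases subl with
    | nil => simp at hm
    | cons a b => rfl
  have hc : PySem.Chars.count l subl = PySem.Chars.count.go subl l.length l 0 := by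
    rw [PySem.Chars.count, hne]
    simp
  rw [hc]
  have := countgo_eq_gcnt subl n hm (n + 1) l.length 0 0 l hl (by omega) (by omega)
  simpa using this

lemma count_nil (l : List Char) : PySem.Chars.count l [] = l.length + 1 := by
  rw [PySem.Chars.count]
  rfl

lemma prefix_iff_getD (subl l : List Char) (j : Nat) (h : j + subl.length ≤ l.length) :
    subl.isPrefixOf (l.drop j) = true ↔
      ∀ t, t < subl.length → l.getD (j + t) ' ' = subl.getD t ' ' := by
  rw [List.isPrefixOf_iff_prefix, List.prefix_iff_getElem]
  constructor
  · rintro ⟨hle, hget⟩ t ht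
    have h1 : j + t < l.length := by omega
    have h2 : t < (l.drop j).length := by simp; omega
    rw [List.getD_eq_getElem l ' ' h1, List.getD_eq_getElem subl ' ' ht]
    have := hget t ht
    rw [List.getElem_drop] at this
    rw [← this]
  · intro hall
    refine ⟨by simp; omega, ?_⟩
    intro t ht
    have h1 : j + t < l.length := by omega
    rw [List.getElem_drop]
    have := hall t ht
    rw [List.getD_eq_getElem l ' ' h1, List.getD_eq_getElem subl ' ' ht] at this
    rw [this]

lemma getD_set {α : Type} [Inhabited α] (l : List α) (i x : Nat) (k d : α) :
    (l.set i k).getD x d = if i = x ∧ x < l.length then k else l.getD x d := by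
  by_cases hx : x < l.length
  · have hx' : x < (l.set i k).length := by simpa using hx
    rw [List.getD_eq_getElem _ d hx', List.getD_eq_getElem _ d hx, List.getElem_set]
    split_ifs with h1 h2 h3 <;> simp_all
  · have h1 : (l.set i k).length ≤ x := by simpa using (by omega : l.length ≤ x)
    rw [List.getD_eq_default _ d h1, List.getD_eq_default _ d (by omega)]
    split_ifs with h2
    · omega
    · rfl

def pvQ (sl subl : List Char) (j t : Nat) : Bool := decide (sl.getD (j + t) ' ' ≠ subl.getD t ' ')

lemma mismInner_one (sl subl : List Char) (j : Nat) :
    ∀ ts p1, pvMismInner sl subl j ts (1, p1)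
      = (match ts.filter (pvQ sl subl j) with
         | [] => (1, p1)
         | t :: _ => (2, ((j + t : Nat) : Int))) := by
  intro ts
  induction ts with
  | nil => intro p1; rfl
  | cons t ts ih =>
    intro p1
    by_cases hq : sl.getD (j + t) ' ' ≠ subl.getD t ' '
    · have hqt : pvQ sl subl j t = true := decide_eq_true hq
      simp only [pvMismInner, if_pos hq, List.filter_cons, hqt, if_true]
      rw [if_pos (by norm_num : ((1 : Int) + 1 > 1))]
      have h2 : (1 : Int) + 1 = 2 := by norm_num
      rw [h2]
    · have hqt : pvQ sl subl j t = false := decide_eq_false hq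
      simp only [pvMismInner, if_neg hq, List.filter_cons, hqt]
      simp only [Bool.false_eq_true, if_false]
      exact ih p1

lemma mismInner_zero (sl subl : List Char) (j : Nat) :
    ∀ ts, pvMismInner sl subl j ts (0, -1)
      = (match ts.filter (pvQ sl subl j) with
         | [] => (0, -1)
         | [t] => (1, ((j + t : Nat) : Int))
         | _ :: t2 :: _ => (2, ((j + t2 : Nat) : Int))) := by
  intro ts
  induction ts with
  | nil => rfl
  | cons t ts ih =>
    by_cases hq : sl.getD (j + t) ' ' ≠ subl.getD t ' '
    · have hqt : pvQ sl subl j t = true := decide_eq_true hq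
      simp only [pvMismInner, if_pos hq, List.filter_cons, hqt, if_true]
      rw [if_neg (by norm_num : ¬ ((0 : Int) + 1 > 1))]
      have h1 : (0 : Int) + 1 = 1 := by norm_num
      rw [h1, mismInner_one sl subl j ts (((j + t : Nat) : Int))]
      cases hfe : ts.filter (pvQ sl subl j) with
      | nil => simp
      | cons t2 r => simp
    · have hqt : pvQ sl subl j t = false := decide_eq_false hq
      simp only [pvMismInner, if_neg hq, List.filter_cons, hqt]
      simp only [Bool.false_eq_true, if_false]
      exact ih

lemma mism_getD (sl subl : List Char) (j : Nat) (h : j < sl.length + 1 - subl.length) :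
    (pvMism sl subl).getD j (0, -1) = pvMismInner sl subl j (List.range subl.length) (0, -1) := by
  unfold pvMism
  rw [List.getD_eq_getElem _ _ (by simpa using h)]
  simp

lemma filter_nil_iff_noQ (sl subl : List Char) (j : Nat) :
    (List.range subl.length).filter (pvQ sl subl j) = []
      ↔ ∀ t, t < subl.length → sl.getD (j + t) ' ' = subl.getD t ' ' := by
  rw [List.filter_eq_nil_iff]
  constructor
  · intro hf t ht
    have := hf t (List.mem_range.mpr ht)
    simp [pvQ] at this
    exact this
  · intro hall t htm
    have := hall t (List.mem_range.mp htm)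
    simp [pvQ]
    exact this

lemma match0_eq (sl subl : List Char) (hm : 0 < subl.length) (j : Nat)
    (h : j + subl.length ≤ sl.length) :
    pvMatch0 (pvMism sl subl) j = subl.isPrefixOf (sl.drop j) := by
  have hj : j < sl.length + 1 - subl.length := by omega
  rw [pvMatch0, mism_getD sl subl j hj, mismInner_zero]
  rw [Bool.eq_iff_iff]
  cases hfe : (List.range subl.length).filter (pvQ sl subl j) with
  | nil =>
    simp only []
    constructor
    · intro _
      exact (prefix_iff_getD subl sl j h).mpr ((filter_nil_iff_noQ sl subl j).mp hfe)
    · intro _; rfl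
  | cons t1 rest =>
    have ht1 : t1 ∈ (List.range subl.length).filter (pvQ sl subl j) := by rw [hfe]; simp
    have ht1m : t1 < subl.length := List.mem_range.mp (List.mem_filter.mp ht1).1
    have ht1q : pvQ sl subl j t1 = true := (List.mem_filter.mp ht1).2
    have hne : ¬ (sl.getD (j + t1) ' ' = subl.getD t1 ' ') := by
      simpa [pvQ] using ht1q
    constructor
    · intro hb
      exfalso
      cases rest <;> simp at hb
    · intro hb
      exfalso
      exact hne ((prefix_iff_getD subl sl j h).mp hb t1 ht1m)

lemma match_untouched (sl subl : List Char) (i j : Nat) (k : Char)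
    (h : j + subl.length ≤ sl.length) (hout : i < j ∨ j + subl.length ≤ i) :
    subl.isPrefixOf ((sl.set i k).drop j) = subl.isPrefixOf (sl.drop j) := by
  rw [Bool.eq_iff_iff]
  rw [prefix_iff_getD subl (sl.set i k) j (by simpa using h), prefix_iff_getD subl sl j h]
  have hgd : ∀ t, t < subl.length → (sl.set i k).getD (j + t) ' ' = sl.getD (j + t) ' ' := by
    intro t ht
    rw [getD_set]
    have : ¬ (i = j + t ∧ j + t < sl.length) := by omega
    rw [if_neg this]
  constructor
  · intro hall t ht; rw [← hgd t ht]; exact hall t ht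
  · intro hall t ht; rw [hgd t ht]; exact hall t ht

lemma row_cond (sl subl : List Char) (j i : Nat) :
    ((((pvMismInner sl subl j (List.range subl.length) (0, -1)).1 == 0)
      || ((pvMismInner sl subl j (List.range subl.length) (0, -1)).1 == 1
          && (pvMismInner sl subl j (List.range subl.length) (0, -1)).2 == ((i : Nat) : Int))) = true)
    ↔ ∀ t, t < subl.length → pvQ sl subl j t = true → j + t = i := by
  rw [mismInner_zero]
  have hnd : ((List.range subl.length).filter (pvQ sl subl j)).Nodup :=
    (List.nodup_range).filter _
  cases hfe : (List.range subl.length).filter (pvQ sl subl j) with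
  | nil =>
    simp only []
    constructor
    · intro _ t ht hq
      exfalso
      have : t ∈ (List.range subl.length).filter (pvQ sl subl j) :=
        List.mem_filter.mpr ⟨List.mem_range.mpr ht, hq⟩
      rw [hfe] at this
      simp at this
    · intro _; simp
  | cons t1 rest =>
    have ht1 : t1 ∈ (List.range subl.length).filter (pvQ sl subl j) := by rw [hfe]; simp
    have ht1m : t1 < subl.length := List.mem_range.mp (List.mem_filter.mp ht1).1
    have ht1q : pvQ sl subl j t1 = true := (List.mem_filter.mp ht1).2
    cases rest with
    | nil =>
      simp only []
      constructor
      · intro hb t ht hq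
        have hti : j + t1 = i := by
          simp at hb
          omega
        have : t ∈ (List.range subl.length).filter (pvQ sl subl j) :=
          List.mem_filter.mpr ⟨List.mem_range.mpr ht, hq⟩
        rw [hfe] at this
        simp at this
        omega
      · intro hall
        have := hall t1 ht1m ht1q
        simp
        omega
    | cons t2 rest2 =>
      have ht2 : t2 ∈ (List.range subl.length).filter (pvQ sl subl j) := by rw [hfe]; simp
      have ht2m : t2 < subl.length := List.mem_range.mp (List.mem_filter.mp ht2).1
      have ht2q : pvQ sl subl j t2 = true := (List.mem_filter.mp ht2).2
      have hne12 : t1 ≠ t2 := by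
        rw [hfe] at hnd
        rcases List.nodup_cons.mp hnd with ⟨hnotin, _⟩
        intro he
        exact hnotin (by rw [he]; simp)
      simp only []
      constructor
      · intro hb; exfalso; simp at hb
      · intro hall
        exfalso
        have h1 := hall t1 ht1m ht1q
        have h2 := hall t2 ht2m ht2q
        omega

lemma matchB_eq (sl subl : List Char) (hm : 0 < subl.length) (i j : Nat) (k : Char)
    (hi : i < sl.length) (h : j + subl.length ≤ sl.length) (hji : j ≤ i)
    (hij : i < j + subl.length) :
    (k == subl.getD (i - j) ' '
      && (((pvMism sl subl).getD j (0, -1)).1 == 0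
          || (((pvMism sl subl).getD j (0, -1)).1 == 1
              && ((pvMism sl subl).getD j (0, -1)).2 == ((i : Nat) : Int))))
      = subl.isPrefixOf ((sl.set i k).drop j) := by
  have hj : j < sl.length + 1 - subl.length := by omega
  rw [mism_getD sl subl j hj, Bool.eq_iff_iff]
  rw [Bool.and_eq_true, prefix_iff_getD subl (sl.set i k) j (by simpa using h), row_cond]
  constructor
  · rintro ⟨hk, hcond⟩ t ht
    rw [getD_set]
    have hlt : j + t < sl.length := by omega
    by_cases hti : i = j + t
    · rw [if_pos ⟨hti, hlt⟩]
      have : t = i - j := by omega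
      rw [this]
      exact eq_of_beq hk
    · rw [if_neg (by omega)]
      by_cases hq : pvQ sl subl j t = true
      · exfalso
        have := hcond t ht hq
        omega
      · simpa [pvQ] using hq
  · intro hall
    constructor
    · have hd : i - j < subl.length := by omega
      have := hall (i - j) hd
      rw [getD_set, if_pos (by omega : i = j + (i - j) ∧ j + (i - j) < sl.length)] at this
      exact beq_iff_eq.mpr this
    · intro t ht hq
      by_contra hne
      have := hall t ht
      rw [getD_set, if_neg (by omega)] at this
      have hq' : ¬ (sl.getD (j + t) ' ' = subl.getD t ' ') := by simpa [pvQ] using hq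
      exact hq' this

def sfx (mism : List (Int × Int)) (m n j : Nat) : Nat := gcnt (pvMatch0 mism) m n (n + 1) j 0

lemma sfx_stop (mism : List (Int × Int)) (m n j : Nat) (h : n < j + m) : sfx mism m n j = 0 := by
  show (if j + m ≤ n then _ else 0) = 0
  rw [if_neg (by omega)]

lemma sfx_step (mism : List (Int × Int)) (m n j : Nat) (hm : 0 < m) (h : j + m ≤ n) :
    sfx mism m n j
      = if pvMatch0 mism j then 1 + sfx mism m n (j + m) else sfx mism m n (j + 1) := by
  unfold sfx
  rw [gcnt_step (pvMatch0 mism) m n hm j 0 h]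
  split_ifs with h2
  · rw [gcnt_acc]
  · rfl

lemma gbLoop_correct (mism : List (Int × Int)) (m n : Nat) (hm : 0 < m) :
    ∀ (cnt : Nat) (g : List Int), cnt ≤ n + 1 - m → g.length = n + 2 →
      (∀ j', cnt ≤ j' → g.getD j' 0 = (sfx mism m n j' : Int)) →
      ∀ j', (pvGbLoop mism m cnt g).getD j' 0 = (sfx mism m n j' : Int) := by
  intro cnt
  induction cnt with
  | zero =>
    intro g _ _ hg j'
    exact hg j' (Nat.zero_le j')
  | succ cn ih =>
    intro g hcm hglen hg j'
    show (pvGbLoop mism m cn _).getD j' 0 = _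
    apply ih
    · omega
    · simpa using hglen
    · intro j2 hj2
      rw [getD_set]
      by_cases hj2e : j2 = cn
      · subst hj2e
        rw [if_pos ⟨rfl, by omega⟩]
        rw [hg (j2 + m) (by omega), hg (j2 + 1) (by omega)]
        rw [sfx_step mism m n j2 hm (by omega)]
        split_ifs with hp
        · push_cast; ring
        · rfl
      · rw [if_neg (by omega)]
        exact hg j2 (by omega)

lemma visLoop_append (mism : List (Int × Int)) (m n : Nat) :
    ∀ fuel j c acc, pvVisLoop mism m n fuel j c acc = acc ++ pvVisLoop mism m n fuel j c [] := by
  intro fuel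
  induction fuel with
  | zero => intro j c acc; simp [pvVisLoop]
  | succ f ih =>
    intro j c acc
    show (if j + m ≤ n then _ else _) = acc ++ (if j + m ≤ n then _ else _)
    split_ifs with h1 h2
    · rw [ih (j + m) (c + 1) (acc ++ [(j, c)]), ih (j + m) (c + 1) ([] ++ [(j, c)])]
      simp
    · rw [ih (j + 1) c (acc ++ [(j, c)]), ih (j + 1) c ([] ++ [(j, c)])]
      simp
    · simp

lemma vis_ne (mism : List (Int × Int)) (m n : Nat) :
    ∀ fuel j c, pvVisLoop mism m n fuel j c [] ≠ [] := by
  intro fuel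
  induction fuel with
  | zero => intro j c; simp [pvVisLoop]
  | succ f ih =>
    intro j c
    show (if j + m ≤ n then _ else _) ≠ []
    split_ifs with h1 h2
    · rw [visLoop_append mism m n f (j + m) (c + 1) ([] ++ [(j, c)])]
      simp
    · rw [visLoop_append mism m n f (j + 1) c ([] ++ [(j, c)])]
      simp
    · simp

lemma vis_head (mism : List (Int × Int)) (m n : Nat) :
    ∀ fuel j c, (pvVisLoop mism m n fuel j c []).head? = some (j, c) := by
  intro fuel
  induction fuel with
  | zero => intro j c; simp [pvVisLoop]
  | succ f ih =>
    intro j c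
    show List.head? (if j + m ≤ n then (if pvMatch0 mism j then pvVisLoop mism m n f (j + m) (c + 1) ([] ++ [(j, c)]) else pvVisLoop mism m n f (j + 1) c ([] ++ [(j, c)])) else [] ++ [(j, c)]) = _
    split_ifs with h1 h2
    · rw [visLoop_append mism m n f (j + m) (c + 1) ([] ++ [(j, c)])]
      simp
    · rw [visLoop_append mism m n f (j + 1) c ([] ++ [(j, c)])]
      simp
    · simp

lemma vis_first_ge (mism : List (Int × Int)) (m n : Nat) :
    ∀ fuel j c x, x ∈ pvVisLoop mism m n fuel j c [] → j ≤ x.1 := by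
  intro fuel
  induction fuel with
  | zero =>
    intro j c x hx
    simp [pvVisLoop] at hx
    simp [hx]
  | succ f ih =>
    intro j c x hx
    rw [show pvVisLoop mism m n (f + 1) j c [] = (if j + m ≤ n then (if pvMatch0 mism j then pvVisLoop mism m n f (j + m) (c + 1) [(j, c)] else pvVisLoop mism m n f (j + 1) c [(j, c)]) else [(j, c)]) from rfl] at hx
    split_ifs at hx with h1 h2
    · rw [visLoop_append mism m n f (j + m) (c + 1) [(j, c)]] at hx
      simp at hx
      rcases hx with hx | hx
      · simp [hx]
      · have := ih (j + m) (c + 1) x hx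
        omega
    · rw [visLoop_append mism m n f (j + 1) c [(j, c)]] at hx
      simp at hx
      rcases hx with hx | hx
      · simp [hx]
      · have := ih (j + 1) c x hx
        omega
    · simp at hx
      simp [hx]

lemma vis_pairwise (mism : List (Int × Int)) (m n : Nat) (hm : 0 < m) :
    ∀ fuel j c, (pvVisLoop mism m n fuel j c []).Pairwise (fun a b => a.1 < b.1) := by
  intro fuel
  induction fuel with
  | zero => intro j c; simp [pvVisLoop]
  | succ f ih =>
    intro j c
    show List.Pairwise _ (if j + m ≤ n then (if pvMatch0 mism j then pvVisLoop mism m n f (j + m) (c + 1) ([] ++ [(j, c)]) else pvVisLoop mism m n f (j + 1) c ([] ++ [(j, c)])) else [] ++ [(j, c)])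
    split_ifs with h1 h2
    · rw [show ([] : List (Nat × Nat)) ++ [(j, c)] = [(j, c)] from rfl]
      rw [visLoop_append mism m n f (j + m) (c + 1) [(j, c)]]
      rw [List.singleton_append, List.pairwise_cons]
      refine ⟨?_, ih (j + m) (c + 1)⟩
      intro x hx
      have := vis_first_ge mism m n f (j + m) (c + 1) x hx
      omega
    · rw [show ([] : List (Nat × Nat)) ++ [(j, c)] = [(j, c)] from rfl]
      rw [visLoop_append mism m n f (j + 1) c [(j, c)]]
      rw [List.singleton_append, List.pairwise_cons]
      refine ⟨?_, ih (j + 1) c⟩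
      intro x hx
      have := vis_first_ge mism m n f (j + 1) c x hx
      omega
    · simp

lemma vis_bounded (mism : List (Int × Int)) (m n : Nat) (hm : 0 < m) :
    ∀ fuel j c, j ≤ n → ∀ x, x ∈ pvVisLoop mism m n fuel j c [] → x.1 ≤ n := by
  intro fuel
  induction fuel with
  | zero =>
    intro j c hj x hx
    simp [pvVisLoop] at hx
    simp [hx]
    omega
  | succ f ih =>
    intro j c hj x hx
    rw [show pvVisLoop mism m n (f + 1) j c [] = (if j + m ≤ n then (if pvMatch0 mism j then pvVisLoop mism m n f (j + m) (c + 1) [(j, c)] else pvVisLoop mism m n f (j + 1) c [(j, c)]) else [(j, c)]) from rfl] at hx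
    split_ifs at hx with h1 h2
    · rw [visLoop_append mism m n f (j + m) (c + 1) [(j, c)]] at hx
      simp at hx
      rcases hx with hx | hx
      · simp [hx]; omega
      · exact ih (j + m) (c + 1) (by omega) x hx
    · rw [visLoop_append mism m n f (j + 1) c [(j, c)]] at hx
      simp at hx
      rcases hx with hx | hx
      · simp [hx]; omega
      · exact ih (j + 1) c (by omega) x hx
    · simp at hx
      simp [hx]
      omega

lemma vis_last_big (mism : List (Int × Int)) (m n : Nat) (hm : 0 < m) :
    ∀ fuel j c, n + 1 ≤ j + fuel →
      n < ((pvVisLoop mism m n fuel j c []).getLastD (0, 0)).1 + m := by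
  intro fuel
  induction fuel with
  | zero =>
    intro j c h
    simp [pvVisLoop]
    omega
  | succ f ih =>
    intro j c h
    show n < ((if j + m ≤ n then _ else _ : List (Nat × Nat)).getLastD (0, 0)).1 + m
    split_ifs with h1 h2
    · rw [show ([] : List (Nat × Nat)) ++ [(j, c)] = [(j, c)] from rfl]
      rw [visLoop_append mism m n f (j + m) (c + 1) [(j, c)]]
      rw [List.getLastD_eq_getLast?, List.getLast?_append_of_ne_nil _ (vis_ne mism m n f (j + m) (c + 1)), ← List.getLastD_eq_getLast?]
      exact ih (j + m) (c + 1) (by omega)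
    · rw [show ([] : List (Nat × Nat)) ++ [(j, c)] = [(j, c)] from rfl]
      rw [visLoop_append mism m n f (j + 1) c [(j, c)]]
      rw [List.getLastD_eq_getLast?, List.getLast?_append_of_ne_nil _ (vis_ne mism m n f (j + 1) c), ← List.getLastD_eq_getLast?]
      exact ih (j + 1) c (by omega)
    · simp
      omega

def fGe : List (Nat × Nat) → Nat → Nat × Nat
  | [], _ => (0, 0)
  | x :: xs, p => if p ≤ x.1 then x else fGe xs p

lemma vis_main (mism : List (Int × Int)) (m n : Nat) (hm : 0 < m) :
    ∀ fuel j c p, n + 1 ≤ j + fuel → j ≤ p →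
      p ≤ ((pvVisLoop mism m n fuel j c []).getLastD (0, 0)).1 →
      p ≤ (fGe (pvVisLoop mism m n fuel j c []) p).1 ∧
      ∀ (pm : Nat → Bool), (∀ j', j ≤ j' → j' < p → j' + m ≤ n → pm j' = pvMatch0 mism j') →
        gcnt pm m n (n + 1) j c
          = gcnt pm m n (n + 1) (fGe (pvVisLoop mism m n fuel j c []) p).1
              (fGe (pvVisLoop mism m n fuel j c []) p).2 := by
  intro fuel
  induction fuel with
  | zero =>
    intro j c p h hjp hpl
    simp [pvVisLoop] at hpl ⊢
    have hpj : p = j := by omega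
    subst hpj
    simp [fGe]
  | succ f ih =>
    intro j c p h hjp hpl
    rw [show pvVisLoop mism m n (f + 1) j c [] = (if j + m ≤ n then (if pvMatch0 mism j then pvVisLoop mism m n f (j + m) (c + 1) ([] ++ [(j, c)]) else pvVisLoop mism m n f (j + 1) c ([] ++ [(j, c)])) else [] ++ [(j, c)]) from rfl] at hpl ⊢
    by_cases h1 : j + m ≤ n
    · rw [if_pos h1] at hpl ⊢
      by_cases h2 : pvMatch0 mism j = true
      · rw [if_pos h2] at hpl ⊢
        rw [show ([] : List (Nat × Nat)) ++ [(j, c)] = [(j, c)] from rfl] at hpl ⊢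
        rw [visLoop_append mism m n f (j + m) (c + 1) [(j, c)]] at hpl ⊢
        rw [List.singleton_append] at hpl ⊢
        by_cases hpj : p ≤ j
        · constructor
          · simp [fGe, hpj]
          · intro pm _
            simp [fGe, hpj]
        · -- p > j : fGe goes to the tail
          have hfge : fGe ((j, c) :: pvVisLoop mism m n f (j + m) (c + 1) []) p
              = fGe (pvVisLoop mism m n f (j + m) (c + 1) []) p := by
            simp [fGe, hpj]
          rw [hfge]
          rw [List.getLastD_eq_getLast?, show ((j, c) :: pvVisLoop mism m n f (j + m) (c + 1) []) = [(j, c)] ++ pvVisLoop mism m n f (j + m) (c + 1) [] from rfl, List.getLast?_append_of_ne_nil _ (vis_ne mism m n f (j + m) (c + 1)), ← List.getLastD_eq_getLast?] at hpl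
          by_cases hjm : j + m ≤ p
          · -- recurse
            have hrec := ih (j + m) (c + 1) p (by omega) hjm hpl
            refine ⟨hrec.1, ?_⟩
            intro pm hagr
            have hstep := gcnt_step pm m n hm j c h1
            rw [hagr j le_rfl (by omega) (by omega), h2] at hstep
            simp only [if_pos] at hstep
            rw [hstep]
            exact hrec.2 pm (fun j' h3 h4 h5 => hagr j' (by omega) h4 h5)
          · -- p ≤ j + m : the head of the tail is already ≥ p
            have hh := vis_head mism m n f (j + m) (c + 1)
            obtain ⟨tl, htl⟩ : ∃ tl, pvVisLoop mism m n f (j + m) (c + 1) [] = (j + m, c + 1) :: tl := by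
              cases hv : pvVisLoop mism m n f (j + m) (c + 1) [] with
              | nil => exact absurd hv (vis_ne mism m n f (j + m) (c + 1))
              | cons y tl =>
                rw [hv] at hh
                simp at hh
                exact ⟨tl, by rw [hh]⟩
            rw [htl]
            have hple : p ≤ j + m := by omega
            constructor
            · simp [fGe, hple]
            · intro pm hagr
              simp only [fGe, hple, if_pos]
              have hstep := gcnt_step pm m n hm j c h1
              rw [hagr j le_rfl (by omega) (by omega), h2] at hstep
              simp only [if_pos] at hstep
              simpa using hstep
      · rw [if_neg h2] at hpl ⊢
        rw [show ([] : List (Nat × Nat)) ++ [(j, c)] = [(j, c)] from rfl] at hpl ⊢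
        rw [visLoop_append mism m n f (j + 1) c [(j, c)]] at hpl ⊢
        rw [List.singleton_append] at hpl ⊢
        by_cases hpj : p ≤ j
        · constructor
          · simp [fGe, hpj]
          · intro pm _
            simp [fGe, hpj]
        · have hfge : fGe ((j, c) :: pvVisLoop mism m n f (j + 1) c []) p
              = fGe (pvVisLoop mism m n f (j + 1) c []) p := by
            simp [fGe, hpj]
          rw [hfge]
          rw [List.getLastD_eq_getLast?, show ((j, c) :: pvVisLoop mism m n f (j + 1) c []) = [(j, c)] ++ pvVisLoop mism m n f (j + 1) c [] from rfl, List.getLast?_append_of_ne_nil _ (vis_ne mism m n f (j + 1) c), ← List.getLastD_eq_getLast?] at hpl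
          have hrec := ih (j + 1) c p (by omega) (by omega) hpl
          refine ⟨hrec.1, ?_⟩
          intro pm hagr
          have hstep := gcnt_step pm m n hm j c h1
          rw [hagr j le_rfl (by omega) (by omega)] at hstep
          rw [Bool.not_eq_true] at h2
          rw [h2] at hstep
          simp only [Bool.false_eq_true, if_false] at hstep
          rw [hstep]
          exact hrec.2 pm (fun j' h3 h4 h5 => hagr j' (by omega) h4 h5)
    · rw [if_neg h1] at hpl ⊢
      rw [show ([] : List (Nat × Nat)) ++ [(j, c)] = [(j, c)] from rfl] at hpl ⊢
      simp at hpl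
      have hpj : p = j := by omega
      subst hpj
      simp [fGe]

lemma resLoop_preserve :
    ∀ (vs res : List (Nat × Nat)) (p : Nat), p < res.length →
      (pvResLoop vs res).getD p (0, 0) = res.getD p (0, 0) := by
  intro vs
  induction vs with
  | nil => intro res p _; rfl
  | cons x rest ih =>
    intro res p hp
    obtain ⟨vj, vc⟩ := x
    show (pvResLoop rest _).getD p (0, 0) = _
    rw [ih _ p (by simp; omega)]
    exact List.getD_append _ _ _ p hp

lemma resLoop_len_mono :
    ∀ (vs res : List (Nat × Nat)), res.length ≤ (pvResLoop vs res).length := by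
  intro vs
  induction vs with
  | nil => intro res; exact le_rfl
  | cons x rest ih =>
    intro res
    obtain ⟨vj, vc⟩ := x
    calc res.length ≤ (res ++ List.replicate (vj + 1 - res.length) (vj, vc)).length := by simp
    _ ≤ _ := ih _

lemma resLoop_length :
    ∀ (vs res : List (Nat × Nat)) x, x ∈ vs → x.1 < (pvResLoop vs res).length := by
  intro vs
  induction vs with
  | nil => intro res x hx; simp at hx
  | cons y rest ih =>
    intro res x hx
    obtain ⟨vj, vc⟩ := y
    rcases List.mem_cons.mp hx with he | hm
    · show x.1 < (pvResLoop rest (res ++ List.replicate (vj + 1 - res.length) (vj, vc))).length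
      have h1 : x.1 < (res ++ List.replicate (vj + 1 - res.length) (vj, vc)).length := by
        rw [he]; simp; omega
      exact lt_of_lt_of_le h1 (resLoop_len_mono rest _)
    · exact ih _ x hm

lemma resLoop_getD :
    ∀ (vs res : List (Nat × Nat)) (p : Nat),
      vs.Pairwise (fun a b => a.1 < b.1) → (∀ x ∈ vs, res.length ≤ x.1 + 1) →
      res.length ≤ p → (∃ x ∈ vs, p ≤ x.1) →
      (pvResLoop vs res).getD p (0, 0) = fGe vs p := by
  intro vs
  induction vs with
  | nil =>
    intro res p _ _ _ hex
    simp at hex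
  | cons y rest ih =>
    intro res p hpw hlen hrp hex
    obtain ⟨vj, vc⟩ := y
    show (pvResLoop rest (res ++ List.replicate (vj + 1 - res.length) (vj, vc))).getD p (0, 0) = _
    have hresl : res.length ≤ vj + 1 := hlen (vj, vc) (by simp)
    have hlen' : (res ++ List.replicate (vj + 1 - res.length) (vj, vc)).length = max res.length (vj + 1) := by
      simp; omega
    by_cases hple : p ≤ vj
    · -- the answer is the head
      have hfge : fGe ((vj, vc) :: rest) p = (vj, vc) := by simp [fGe, hple]
      rw [hfge]
      rw [resLoop_preserve rest _ p (by rw [hlen']; omega)]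
      rw [List.getD_append_right res _ _ p hrp]
      exact List.getD_replicate _ (by omega)
    · have hfge : fGe ((vj, vc) :: rest) p = fGe rest p := by simp [fGe, hple]
      rw [hfge]
      apply ih
      · exact (List.pairwise_cons.mp hpw).2
      · intro x hx
        have := (List.pairwise_cons.mp hpw).1 x hx
        rw [hlen']
        omega
      · rw [hlen']; omega
      · rcases hex with ⟨x, hx, hpx⟩
        rcases List.mem_cons.mp hx with he | hmem
        · exfalso
          rw [he] at hpx
          simp at hpx
          omega
        · exact ⟨x, hmem, hpx⟩

lemma local_spec (subl : List Char) (mism : List (Int × Int)) (m n i : Nat) (k : Char) (hm : 0 < m) :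
    ∀ fuel j c, i + 1 ≤ j + fuel → j ≤ n →
      (i < (pvLocalLoop subl mism m n i k fuel j c).1
        ∨ n < (pvLocalLoop subl mism m n i k fuel j c).1 + m) ∧
      (pvLocalLoop subl mism m n i k fuel j c).1 ≤ n ∧
      ∀ (pm : Nat → Bool),
        (∀ j', j ≤ j' → j' ≤ i → j' + m ≤ n →
          pm j' = (k == subl.getD (i - j') ' '
            && ((mism.getD j' (0, -1)).1 == 0
                || ((mism.getD j' (0, -1)).1 == 1
                    && (mism.getD j' (0, -1)).2 == ((i : Nat) : Int))))) →
        gcnt pm m n (n + 1) j c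
          = gcnt pm m n (n + 1) (pvLocalLoop subl mism m n i k fuel j c).1
              (pvLocalLoop subl mism m n i k fuel j c).2 := by
  intro fuel
  induction fuel with
  | zero =>
    intro j c h hjn
    refine ⟨by simp [pvLocalLoop]; omega, by simp [pvLocalLoop]; omega, ?_⟩
    intro pm _
    rfl
  | succ f ih =>
    intro j c h hjn
    rw [show pvLocalLoop subl mism m n i k (f + 1) j c
        = (if j ≤ i ∧ j + m ≤ n then
            (if k == subl.getD (i - j) ' ' && ((mism.getD j (0, -1)).1 == 0 || ((mism.getD j (0, -1)).1 == 1 && (mism.getD j (0, -1)).2 == ((i : Nat) : Int))) then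
              pvLocalLoop subl mism m n i k f (j + m) (c + 1)
            else pvLocalLoop subl mism m n i k f (j + 1) c)
          else (j, c)) from rfl]
    by_cases h1 : j ≤ i ∧ j + m ≤ n
    · rw [if_pos h1]
      by_cases h2 : (k == subl.getD (i - j) ' ' && ((mism.getD j (0, -1)).1 == 0 || ((mism.getD j (0, -1)).1 == 1 && (mism.getD j (0, -1)).2 == ((i : Nat) : Int)))) = true
      · rw [if_pos h2]
        have hrec := ih (j + m) (c + 1) (by omega) (by omega)
        refine ⟨hrec.1, hrec.2.1, ?_⟩
        intro pm hagr
        have hstep := gcnt_step pm m n hm j c h1.2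
        rw [hagr j le_rfl h1.1 h1.2, h2] at hstep
        simp only [if_pos] at hstep
        rw [hstep]
        exact hrec.2.2 pm (fun j' h3 h4 h5 => hagr j' (by omega) h4 h5)
      · rw [if_neg h2]
        have hrec := ih (j + 1) c (by omega) (by omega)
        refine ⟨hrec.1, hrec.2.1, ?_⟩
        intro pm hagr
        have hstep := gcnt_step pm m n hm j c h1.2
        rw [hagr j le_rfl h1.1 h1.2] at hstep
        rw [Bool.not_eq_true] at h2
        rw [h2] at hstep
        simp only [Bool.false_eq_true, if_false] at hstep
        rw [hstep]
        exact hrec.2.2 pm (fun j' h3 h4 h5 => hagr j' (by omega) h4 h5)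
    · rw [if_neg h1]
      refine ⟨by simp; omega, by simp; omega, ?_⟩
      intro pm _
      rfl

lemma fGe_mem : ∀ (vs : List (Nat × Nat)) (p : Nat), (∃ x ∈ vs, p ≤ x.1) → fGe vs p ∈ vs := by
  intro vs
  induction vs with
  | nil => intro p hex; simp at hex
  | cons y rest ih =>
    intro p hex
    show (if p ≤ y.1 then y else fGe rest p) ∈ y :: rest
    split_ifs with h1
    · simp
    · rcases hex with ⟨x, hx, hpx⟩
      rcases List.mem_cons.mp hx with he | hmem
      · exfalso; rw [he] at hpx; omega
      · exact List.mem_cons_of_mem y (ih p ⟨x, hmem, hpx⟩)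

lemma getLastD_mem : ∀ (vs : List (Nat × Nat)), vs ≠ [] → vs.getLastD (0, 0) ∈ vs := by
  intro vs h
  cases vs with
  | nil => exact absurd rfl h
  | cons y rest =>
    rw [List.getLastD_eq_getLast?, List.getLast?_eq_some_getLast (h := by simp)]
    exact List.getLast_mem _

lemma gb_entry (sl subl : List Char) (hm : 0 < subl.length) (j' : Nat) :
    (pvGbLoop (pvMism sl subl) subl.length (sl.length + 1 - subl.length)
        (List.replicate (sl.length + 2) 0)).getD j' 0
      = (sfx (pvMism sl subl) subl.length sl.length j' : Int) := by
  apply gbLoop_correct (pvMism sl subl) subl.length sl.length hm (sl.length + 1 - subl.length)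
    (List.replicate (sl.length + 2) 0) le_rfl (by simp)
  intro j2 hj2
  have hsf : sfx (pvMism sl subl) subl.length sl.length j2 = 0 :=
    sfx_stop _ _ _ _ (by omega)
  rw [hsf]
  by_cases hlt : j2 < sl.length + 2
  · rw [List.getD_replicate _ hlt]
    rfl
  · rw [List.getD_eq_default _ _ (by simp; omega)]
    rfl

lemma base_value (sl subl : List Char) (hm : 0 < subl.length) :
    (pvGbLoop (pvMism sl subl) subl.length (sl.length + 1 - subl.length)
        (List.replicate (sl.length + 2) 0)).getD 0 0
      = (PySem.Chars.count sl subl : Int) := by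
  rw [gb_entry sl subl hm 0]
  congr 1
  unfold sfx
  rw [gcnt_congr (pvMatch0 (pvMism sl subl)) (fun j' => subl.isPrefixOf (sl.drop j'))
      subl.length sl.length (sl.length + 1) 0 0
      (fun j' _ h' => match0_eq sl subl hm j' h')]
  exact (count_eq_gcnt subl sl sl.length hm rfl).symm

lemma branch_value (sl subl : List Char) (i : Nat) (k : Char)
    (hm : 0 < subl.length) (hi : i < sl.length) :
    ((pvLocalLoop subl (pvMism sl subl) subl.length sl.length i k (sl.length + 1)
        ((pvResLoop (pvVisLoop (pvMism sl subl) subl.length sl.length (sl.length + 1) 0 0 []) []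
          ++ List.replicate (sl.length + 1 - (pvResLoop (pvVisLoop (pvMism sl subl) subl.length sl.length (sl.length + 1) 0 0 []) []).length)
              ((pvVisLoop (pvMism sl subl) subl.length sl.length (sl.length + 1) 0 0 []).getLastD (0, 0))).getD (i + 1 - subl.length) (0, 0)).1
        ((pvResLoop (pvVisLoop (pvMism sl subl) subl.length sl.length (sl.length + 1) 0 0 []) []
          ++ List.replicate (sl.length + 1 - (pvResLoop (pvVisLoop (pvMism sl subl) subl.length sl.length (sl.length + 1) 0 0 []) []).length)
              ((pvVisLoop (pvMism sl subl) subl.length sl.length (sl.length + 1) 0 0 []).getLastD (0, 0))).getD (i + 1 - subl.length) (0, 0)).2).2 : Int)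
      + (pvGbLoop (pvMism sl subl) subl.length (sl.length + 1 - subl.length)
          (List.replicate (sl.length + 2) 0)).getD
          (pvLocalLoop subl (pvMism sl subl) subl.length sl.length i k (sl.length + 1)
            ((pvResLoop (pvVisLoop (pvMism sl subl) subl.length sl.length (sl.length + 1) 0 0 []) []
              ++ List.replicate (sl.length + 1 - (pvResLoop (pvVisLoop (pvMism sl subl) subl.length sl.length (sl.length + 1) 0 0 []) []).length)
                  ((pvVisLoop (pvMism sl subl) subl.length sl.length (sl.length + 1) 0 0 []).getLastD (0, 0))).getD (i + 1 - subl.length) (0, 0)).1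
            ((pvResLoop (pvVisLoop (pvMism sl subl) subl.length sl.length (sl.length + 1) 0 0 []) []
              ++ List.replicate (sl.length + 1 - (pvResLoop (pvVisLoop (pvMism sl subl) subl.length sl.length (sl.length + 1) 0 0 []) []).length)
                  ((pvVisLoop (pvMism sl subl) subl.length sl.length (sl.length + 1) 0 0 []).getLastD (0, 0))).getD (i + 1 - subl.length) (0, 0)).2).1 0
      = (PySem.Chars.count (sl.set i k) subl : Int) := by
  set n := sl.length with hn
  set m := subl.length with hmdef
  set mism := pvMism sl subl with hmism
  set vis := pvVisLoop mism m n (n + 1) 0 0 [] with hvis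
  set res0 := pvResLoop vis [] with hres0
  set lo := i + 1 - m with hlo
  set pm : Nat → Bool := fun j' => subl.isPrefixOf ((sl.set i k).drop j') with hpm
  -- facts about the trajectory
  have hvne : vis ≠ [] := vis_ne mism m n (n + 1) 0 0
  have hlast : n < (vis.getLastD (0, 0)).1 + m :=
    vis_last_big mism m n hm (n + 1) 0 0 (by omega)
  have hlastmem : vis.getLastD (0, 0) ∈ vis := getLastD_mem vis hvne
  have hlo_last : lo ≤ (vis.getLastD (0, 0)).1 := by omega
  have hex : ∃ x ∈ vis, lo ≤ x.1 := ⟨vis.getLastD (0, 0), hlastmem, hlo_last⟩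
  -- res lookup = fGe vis lo
  have hlo_len : lo < res0.length :=
    lt_of_le_of_lt hlo_last (resLoop_length vis [] _ hlastmem)
  have hres_eq : (res0 ++ List.replicate (n + 1 - res0.length) (vis.getLastD (0, 0))).getD lo (0, 0)
      = fGe vis lo := by
    rw [List.getD_append _ _ _ lo hlo_len]
    exact resLoop_getD vis [] lo (vis_pairwise mism m n hm (n + 1) 0 0)
      (fun x _ => by simp) (by simp) hex
  set ec := fGe vis lo with hec
  -- the prefix part of the trajectory
  have hvm := vis_main mism m n hm (n + 1) 0 0 lo (by omega) (by omega) hlo_last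
  have hel : lo ≤ ec.1 := hvm.1
  have hen : ec.1 ≤ n := vis_bounded mism m n hm (n + 1) 0 0 (by omega) ec (fGe_mem vis lo hex)
  have hagr_below : ∀ j', 0 ≤ j' → j' < lo → j' + m ≤ n → pm j' = pvMatch0 mism j' := by
    intro j' _ hjlo hjm
    rw [hpm]
    show subl.isPrefixOf ((sl.set i k).drop j') = pvMatch0 mism j'
    rw [match_untouched sl subl i j' k hjm (by omega), match0_eq sl subl hm j' hjm]
  have hpre : gcnt pm m n (n + 1) 0 0 = gcnt pm m n (n + 1) ec.1 ec.2 := hvm.2 pm hagr_below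
  -- the local part
  have hloc := local_spec subl mism m n i k hm (n + 1) ec.1 ec.2 (by omega) hen
  set jc := pvLocalLoop subl mism m n i k (n + 1) ec.1 ec.2 with hjc
  have hagr_mid : ∀ j', ec.1 ≤ j' → j' ≤ i → j' + m ≤ n →
      pm j' = (k == subl.getD (i - j') ' '
        && ((mism.getD j' (0, -1)).1 == 0
            || ((mism.getD j' (0, -1)).1 == 1
                && (mism.getD j' (0, -1)).2 == ((i : Nat) : Int)))) := by
    intro j' hj1 hj2 hj3
    rw [hpm]
    exact (matchB_eq sl subl hm i j' k hi hj3 hj2 (by omega)).symm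
  have hmid : gcnt pm m n (n + 1) ec.1 ec.2 = gcnt pm m n (n + 1) jc.1 jc.2 :=
    hloc.2.2 pm hagr_mid
  -- the suffix part
  have hsuf : gcnt pm m n (n + 1) jc.1 0 = sfx mism m n jc.1 := by
    unfold sfx
    apply gcnt_congr
    intro j' hj' hjm'
    rcases hloc.1 with hcase | hcase
    · rw [hpm]
      show subl.isPrefixOf ((sl.set i k).drop j') = pvMatch0 mism j'
      rw [match_untouched sl subl i j' k hjm' (Or.inl (by omega)), match0_eq sl subl hm j' hjm']
    · omega
  -- put it together
  have hcount : PySem.Chars.count (sl.set i k) subl = gcnt pm m n (n + 1) 0 0 := by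
    rw [hpm]
    exact count_eq_gcnt subl (sl.set i k) n hm (by rw [List.length_set])
  rw [hres_eq]
  rw [gb_entry sl subl hm jc.1]
  have : (jc.2 : Int) + (sfx mism m n jc.1 : Int) = (PySem.Chars.count (sl.set i k) subl : Int) := by
    rw [hcount, hpre, hmid, gcnt_acc pm m n (n + 1) jc.1 jc.2, hsuf]
    push_cast
    ring
  exact this

lemma A_shape (s sub : String) :
    calc_substr s sub = (List.range s.toList.length).foldl
      (fun mc j => max (max mc (PySem.Chars.count (s.toList.set j 'V') sub.toList : Int))
        (PySem.Chars.count (s.toList.set j 'K') sub.toList : Int))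
      (PySem.Chars.count s.toList sub.toList : Int) := by
  unfold calc_substr
  dsimp only
  rw [PySem.List.pyRange_zero_natCast, List.foldl_map]
  apply PySem.List.foldl_congr_mem
  intro acc x _
  simp [List.foldl, List.set_set]

lemma foldl_max_const (A : Int) :
    ∀ (L : List Nat) (v : Int), A ≤ v →
      L.foldl (fun acc (_ : Nat) => max (max acc A) A) v = v := by
  intro L
  induction L with
  | nil => intro v _; rfl
  | cons x xs ih =>
    intro v hv
    show xs.foldl _ (max (max v A) A) = v
    rw [show max (max v A) A = v by omega]
    exact ih v hv

lemma main_eq (s sub : String) : calc_substr s sub = calc_substr_alt s sub := by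
  rw [A_shape]
  by_cases hm0 : sub.toList.length = 0
  · -- sub = "" : both sides are len(s) + 1
    have hsub : sub.toList = [] := List.length_eq_zero_iff.mp hm0
    unfold calc_substr_alt
    dsimp only
    rw [if_pos hm0, hsub]
    have hstep : ∀ (acc : Int), ∀ j ∈ List.range s.toList.length,
        max (max acc (PySem.Chars.count (s.toList.set j 'V') [] : Int))
          (PySem.Chars.count (s.toList.set j 'K') [] : Int)
        = max (max acc ((s.toList.length : Int) + 1)) ((s.toList.length : Int) + 1) := by
      intro acc j _
      rw [count_nil, count_nil, List.length_set, List.length_set]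
      push_cast
      ring_nf
    rw [PySem.List.foldl_congr_mem _ _ _ _ hstep]
    rw [count_nil]
    have : ((s.toList.length + 1 : Nat) : Int) = (s.toList.length : Int) + 1 := by push_cast; ring
    rw [this]
    exact foldl_max_const _ _ _ le_rfl
  · -- sub nonempty
    have hm : 0 < sub.toList.length := by omega
    unfold calc_substr_alt
    dsimp only
    rw [if_neg hm0]
    rw [base_value s.toList sub.toList hm]
    apply PySem.List.foldl_congr_mem
    intro acc j hj
    have hjn : j < s.toList.length := List.mem_range.mp hj
    simp only [List.foldl]
    rw [branch_value s.toList sub.toList j 'V' hm hjn,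
        branch_value s.toList sub.toList j 'K' hm hjn]

-- ===== VERDICT (by name: the statement is the Claim_ definition above) =====
theorem calc_substr_spec : Claim_equal_calc_substr := by
  intro s sub _
  unfold Spec_calc_substr
  exact main_eq s sub
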